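-- pv_equiv track=rewrite | github.com/Vadamoff/Course_Python | 5_Lesson/5_2.py | list_sets
-- ===== SOURCE A (Python) =====
-- def list_sets(list_in: list):
--     new_list = []
--     for i in range(len(list_in)):
--         temp = list_in[i]
--         temp_list = [temp]
--         for j in range(i + 1, len(list_in)):
--             if list_in[j] > temp:
--                 temp = list_in[j]
--                 temp_list.append(temp)
--         if len(temp_list) > 1:
--             new_list.append(temp_list)
--     return new_list
-- ===== SOURCE B (Python) =====
-- def list_sets(list_in: list):
--     # Right-to-left pass: the chain starting at i is list_in[i] followed by the
--     # elements of the chain starting at i+1 that exceed list_in[i].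
--     result = []
--     chain = []  # chain for the suffix starting one position to the right
--     for x in reversed(list_in):
--         chain = [x] + [v for v in chain if v > x]
--         if len(chain) > 1:
--             result.append(chain)
--     result.reverse()
--     return result
-- ===== Notes on version B (the rewrite author's own statement) =====
-- stated objective: alternative
-- what changed: Replaces A's per-start-index rescan of the whole suffix by a single right-to-left pass that derives each chain from the next suffix's chain (chain(i) = x_i followed by the elements of chain(i+1) exceeding x_i); on outputs of quadratic total size (e.g. sorted input) the cost is the same, so no speed is claimed.
import Mathlib
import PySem

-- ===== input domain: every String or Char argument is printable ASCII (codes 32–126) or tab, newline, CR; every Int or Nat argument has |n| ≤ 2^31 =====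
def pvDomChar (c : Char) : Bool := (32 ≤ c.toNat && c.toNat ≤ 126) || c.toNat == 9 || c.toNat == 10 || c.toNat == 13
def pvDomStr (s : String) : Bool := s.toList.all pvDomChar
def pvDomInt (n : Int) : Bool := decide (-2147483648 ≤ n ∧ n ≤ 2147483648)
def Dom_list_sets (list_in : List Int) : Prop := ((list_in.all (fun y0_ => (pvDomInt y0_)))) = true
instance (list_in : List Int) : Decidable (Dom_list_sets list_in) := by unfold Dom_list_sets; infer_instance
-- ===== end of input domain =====

-- B replaces A's per-index suffix rescan by one right-to-left pass deriving each
-- chain from the next suffix's chain (objective: alternative).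

-- ===== PORT A =====
-- inner loop 'for j in range(i+1, len(list_in)): ...' with its state (temp, temp_list)
def lsInner (l : List Int) : List Int → Int → List Int → Int × List Int
  | [], temp, temp_list => (temp, temp_list)
  | j :: js, temp, temp_list =>
      if PySem.List.pyGetD l j 0 > temp then
        lsInner l js (PySem.List.pyGetD l j 0) (temp_list ++ [PySem.List.pyGetD l j 0])
      else lsInner l js temp temp_list

-- outer loop 'for i in range(len(list_in)): ...' with its accumulator new_list
def lsOuter (l : List Int) : List Int → List (List Int) → List (List Int)
  | [], new_list => new_list
  | i :: is, new_list =>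
      let temp := PySem.List.pyGetD l i 0
      let st := lsInner l (PySem.List.pyRange (i + 1) (l.length : Int) 1) temp [temp]
      lsOuter l is (if st.2.length > 1 then new_list ++ [st.2] else new_list)

def list_sets (list_in : List Int) : List (List Int) :=
  lsOuter list_in (PySem.List.pyRange 0 (list_in.length : Int) 1) []

-- ===== PORT B =====
def list_sets_alt (list_in : List Int) : List (List Int) :=
  let st :=
    list_in.reverse.foldl
      (fun (s : List Int × List (List Int)) x =>
        let chain := [x] ++ s.1.filter (fun v => v > x)
        (chain, if chain.length > 1 then s.2 ++ [chain] else s.2))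
      ([], [])
  st.2.reverse

-- ===== PRECONDITION & SPEC =====
def Spec_list_sets (list_in : List Int) (out : List (List Int)) : Prop := out = list_sets_alt list_in
instance (list_in : List Int) (out : List (List Int)) : Decidable (Spec_list_sets list_in out) := by unfold Spec_list_sets; infer_instance

-- ===== CLAIM (what is proved, stated in full; the proofs are below) =====
def Claim_equal_list_sets : Prop := ∀ (list_in : List Int), Dom_list_sets list_in → Spec_list_sets list_in (list_sets list_in)

-- ===== LEMMAS AND PROOFS =====

-- A's inner loop seen structurally: the elements appended after the head.
def chainA (t : Int) : List Int → List Int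
  | [] => []
  | x :: xs => if x > t then x :: chainA x xs else chainA t xs

-- A's final running maximum.
def maxA (t : Int) : List Int → Int
  | [] => t
  | x :: xs => if x > t then maxA x xs else maxA t xs

-- A's whole result, structurally.
def chainsA : List Int → List (List Int)
  | [] => []
  | x :: xs =>
      (if (x :: chainA x xs).length > 1 then [x :: chainA x xs] else []) ++ chainsA xs

-- B's chain of a suffix, right-to-left (c is the chain of the part to the right).
def fcB : List Int → List Int
  | [] => []
  | x :: xs => [x] ++ (fcB xs).filter (fun v => v > x)

-- B's collected chains, in reversed (right-to-left) build order before the final reverse.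
def cfB : List Int → List (List Int)
  | [] => []
  | x :: xs =>
      (if ([x] ++ (fcB xs).filter (fun v => v > x)).length > 1
        then [[x] ++ (fcB xs).filter (fun v => v > x)] else []) ++ cfB xs

theorem innerA_fold (xs : List Int) : ∀ (t : Int) (acc : List Int),
    xs.foldl
      (fun (s : Int × List Int) x => if x > s.1 then (x, s.2 ++ [x]) else s)
      (t, acc)
    = (maxA t xs, acc ++ chainA t xs) := by
  induction xs with
  | nil => intro t acc; simp [maxA, chainA]
  | cons x xs ih =>
    intro t acc
    simp only [List.foldl_cons, maxA, chainA]
    by_cases h : x > t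
    · simp [h, ih]
    · simp [h, ih]

theorem chainA_mem_gt (xs : List Int) : ∀ (t v : Int), v ∈ chainA t xs → t < v := by
  induction xs with
  | nil => intro t v h; simp [chainA] at h
  | cons x xs ih =>
    intro t v h
    simp only [chainA] at h
    by_cases hx : x > t
    · simp [hx] at h
      rcases h with h | h
      · omega
      · have := ih x v h; omega
    · simp [hx] at h
      exact ih t v h

theorem chainA_eq_filter (xs : List Int) : ∀ (x : Int),
    chainA x xs = (fcB xs).filter (fun v => v > x) := by
  induction xs with
  | nil => intro x; simp [chainA, fcB]
  | cons y ys ih =>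
    intro x
    simp only [chainA, fcB, List.singleton_append, List.filter_cons]
    by_cases h : y > x
    · simp only [h, decide_true, if_pos]
      congr 1
      rw [← ih y]
      exact (List.filter_eq_self.mpr (fun v hv => by
        have := chainA_mem_gt ys y v hv
        simp only [decide_eq_true_eq]
        omega)).symm
    · simp only [h, decide_false, Bool.false_eq_true, if_neg, not_false_iff]
      rw [ih x, ← ih y, ih y, List.filter_filter]
      apply List.filter_congr
      intro v _
      by_cases hvx : v > x
      · simp [hvx, show v > y by omega]
      · simp [hvx]

theorem cfB_eq_chainsA (l : List Int) : cfB l = chainsA l := by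
  induction l with
  | nil => rfl
  | cons x xs ih =>
    simp only [cfB, chainsA, ih, List.singleton_append, ← chainA_eq_filter]

theorem foldB_rev (l : List Int) : ∀ (r0 : List (List Int)),
    l.reverse.foldl
      (fun (s : List Int × List (List Int)) x =>
        let chain := [x] ++ s.1.filter (fun v => v > x)
        (chain, if chain.length > 1 then s.2 ++ [chain] else s.2))
      ([], r0)
    = (fcB l, r0 ++ (cfB l).reverse) := by
  induction l with
  | nil => intro r0; simp [fcB, cfB]
  | cons x xs ih =>
    intro r0
    rw [List.reverse_cons, List.foldl_append, ih r0]
    simp only [List.foldl_cons, List.foldl_nil, fcB, cfB]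
    split_ifs with h
    · simp [List.append_assoc]
    · simp

theorem lsInner_eq_foldl (l : List Int) : ∀ (js : List Int) (t : Int) (tl : List Int),
    lsInner l js t tl
    = js.foldl
        (fun (s : Int × List Int) j =>
          if PySem.List.pyGetD l j 0 > s.1 then
            (PySem.List.pyGetD l j 0, s.2 ++ [PySem.List.pyGetD l j 0])
          else s)
        (t, tl) := by
  intro js
  induction js with
  | nil => intro t tl; rfl
  | cons j js ih =>
    intro t tl
    simp only [lsInner, List.foldl_cons]
    by_cases h : PySem.List.pyGetD l j 0 > t
    · simp [h, ih]
    · simp [h, ih]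

theorem lsOuter_eq_foldl (l : List Int) : ∀ (is : List Int) (acc : List (List Int)),
    lsOuter l is acc
    = is.foldl
        (fun new_list i =>
          let temp := PySem.List.pyGetD l i 0
          let st :=
            (PySem.List.pyRange (i + 1) (l.length : Int) 1).foldl
              (fun (s : Int × List Int) j =>
                if PySem.List.pyGetD l j 0 > s.1 then
                  (PySem.List.pyGetD l j 0, s.2 ++ [PySem.List.pyGetD l j 0])
                else s)
              (temp, [temp])
          if st.2.length > 1 then new_list ++ [st.2] else new_list)
        acc := by
  intro is
  induction is with
  | nil => intro acc; rfl
  | cons i is ih =>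
    intro acc
    simp only [lsOuter, List.foldl_cons, lsInner_eq_foldl, ih]

theorem outerA_aux (l : List Int) : ∀ (n a : Nat), l.length - a ≤ n →
    ∀ (acc : List (List Int)),
    (PySem.List.pyRange (a : Int) (l.length : Int) 1).foldl
      (fun new_list i =>
        let temp := PySem.List.pyGetD l i 0
        let st :=
          (PySem.List.pyRange (i + 1) (l.length : Int) 1).foldl
            (fun (s : Int × List Int) j =>
              if PySem.List.pyGetD l j 0 > s.1 then
                (PySem.List.pyGetD l j 0, s.2 ++ [PySem.List.pyGetD l j 0])
              else s)
            (temp, [temp])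
        if st.2.length > 1 then new_list ++ [st.2] else new_list)
      acc
    = acc ++ chainsA (l.drop a) := by
  intro n
  induction n with
  | zero =>
    intro a ha acc
    have hge : l.length ≤ a := by omega
    rw [PySem.List.pyRange_one_eq_nil (by exact_mod_cast hge)]
    rw [List.drop_eq_nil_of_le hge]
    simp [chainsA]
  | succ n ihn =>
    intro a ha acc
    by_cases hlt : a < l.length
    · rw [PySem.List.pyRange_one_cons (by exact_mod_cast hlt)]
      rw [List.foldl_cons]
      have htemp : PySem.List.pyGetD l (a : Int) 0 = l[a] := by
        simp [PySem.List.pyGetD_natCast, List.getD_eq_getElem?_getD, List.getElem?_eq_getElem hlt]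
      have hinner :
          (PySem.List.pyRange ((a : Int) + 1) (l.length : Int) 1).foldl
            (fun (s : Int × List Int) j =>
              if PySem.List.pyGetD l j 0 > s.1 then
                (PySem.List.pyGetD l j 0, s.2 ++ [PySem.List.pyGetD l j 0])
              else s)
            (l[a], [l[a]])
          = (maxA l[a] (l.drop (a + 1)), [l[a]] ++ chainA l[a] (l.drop (a + 1))) := by
        rw [PySem.List.foldl_pyRange_pyGetD' l 0
              (fun (s : Int × List Int) x => if x > s.1 then (x, s.2 ++ [x]) else s)
              (l[a], [l[a]]) (show (0:Int) ≤ (a : Int) + 1 by positivity)]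
        have : ((a : Int) + 1).toNat = a + 1 := by omega
        rw [this, innerA_fold]
      have hdrop : l.drop a = l[a] :: l.drop (a + 1) := List.drop_eq_getElem_cons hlt
      simp only [htemp, hinner]
      have hcast : (a : Int) + 1 = ((a + 1 : Nat) : Int) := by push_cast; ring
      rw [hcast, ihn (a + 1) (by omega)]
      rw [hdrop]
      simp only [chainsA, List.singleton_append]
      split_ifs <;> simp
    · have hge : l.length ≤ a := by omega
      rw [PySem.List.pyRange_one_eq_nil (by exact_mod_cast hge)]
      rw [List.drop_eq_nil_of_le hge]
      simp [chainsA]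

theorem list_sets_eq_chainsA (l : List Int) : list_sets l = chainsA l := by
  unfold list_sets
  rw [lsOuter_eq_foldl]
  have := outerA_aux l l.length 0 (by omega) []
  simpa using this

theorem list_sets_alt_eq_chainsA (l : List Int) : list_sets_alt l = chainsA l := by
  unfold list_sets_alt
  rw [foldB_rev l []]
  simp [cfB_eq_chainsA]

-- ===== VERDICT (by name: the statement is the Claim_ definition above) =====
theorem list_sets_spec : Claim_equal_list_sets := by
  intro l _
  unfold Spec_list_sets
  rw [list_sets_eq_chainsA, list_sets_alt_eq_chainsA]
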